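-- pv_equiv track=rewrite | github.com/Samith-Pantho/ClickNet | BackEnd/ClickNetApi/Routes/UserIdPasswordRoutes.py | _CheckSuccessivecharacters
-- ===== SOURCE A (Python) =====
-- def _CheckSuccessivecharacters(password: str, PassSuccSameCharAllow:str) -> bool:
--     count = 1
--     last_char = ''
--     for c in password:
--         if c == last_char:
--             count += 1
--             if count > int(PassSuccSameCharAllow):
--                 return True
--         else:
--             count = 1
--             last_char = c
--     return False
-- ===== SOURCE B (Python) =====
-- def _CheckSuccessivecharacters(password: str, PassSuccSameCharAllow: str) -> bool:
--     n = len(password)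
--     i = 0
--     while i < n:
--         j = i + 1
--         while j < n and password[j] == password[i]:
--             j += 1
--         if j - i >= 2 and j - i > int(PassSuccSameCharAllow):
--             return True
--         i = j
--     return False
-- ===== Notes on version B (the rewrite author's own statement) =====
-- stated objective: alternative
-- what changed: B walks the string run-by-run with a two-pointer scan (extend j over the maximal run, then test the run length once), instead of A's per-character loop maintaining a count and last_char and re-evaluating int() on every repeated character.
import Mathlib
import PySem

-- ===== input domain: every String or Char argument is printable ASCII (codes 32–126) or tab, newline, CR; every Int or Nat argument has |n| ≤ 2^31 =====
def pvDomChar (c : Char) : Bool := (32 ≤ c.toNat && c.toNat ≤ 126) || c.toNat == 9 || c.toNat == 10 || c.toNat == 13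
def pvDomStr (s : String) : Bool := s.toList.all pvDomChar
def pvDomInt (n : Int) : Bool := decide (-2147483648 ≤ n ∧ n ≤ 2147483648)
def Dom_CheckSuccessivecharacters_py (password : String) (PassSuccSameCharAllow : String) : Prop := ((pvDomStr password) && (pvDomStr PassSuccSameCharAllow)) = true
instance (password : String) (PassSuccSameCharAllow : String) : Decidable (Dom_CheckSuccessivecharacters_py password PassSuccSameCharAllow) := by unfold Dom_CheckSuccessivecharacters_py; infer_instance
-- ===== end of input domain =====

-- B replaces A's per-character count/last_char loop by a two-pointer run-by-run scan (alternative decomposition, same cost).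
-- Where Python's int(PassSuccSameCharAllow) raises ValueError (only reachable when the password has a repeat), both
-- Pythons raise; those inputs are excluded by Pre_. pvCheck's 'none' arm stands for that unreachable ValueError branch.

-- shared guard: 'm > int(PassSuccSameCharAllow)'; none = Python ValueError (excluded by Pre_, value irrelevant)
def pvCheck (allow : String) (m : Int) : Bool :=
  match PySem.Int.ofStr? allow with
  | some k => decide (m > k)
  | none => true

-- ===== PORT A =====
-- A's loop: per character, maintain count and last_char (Option Char for Python's initial '' sentinel)
def pvALoop (allow : String) : List Char → Int → Option Char → Bool
  | [], _, _ => false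
  | c :: rest, count, last =>
    if some c == last then
      if pvCheck allow (count + 1) then true
      else pvALoop allow rest (count + 1) last
    else pvALoop allow rest 1 (some c)

def CheckSuccessivecharacters_py (password : String) (PassSuccSameCharAllow : String) : Bool :=
  pvALoop PassSuccSameCharAllow password.toList 1 none

-- ===== PORT B =====
-- B's scan: extend over the maximal run of the head character (inner while = takeWhile), test its length once
def pvBLoop (allow : String) : List Char → Bool
  | [] => false
  | c :: rest =>
    let run := rest.takeWhile (· == c)
    if run.length + 1 ≥ 2 then
      if pvCheck allow ((run.length : Int) + 1) then true
      else pvBLoop allow (rest.dropWhile (· == c))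
    else pvBLoop allow rest
termination_by s => s.length
decreasing_by
  · have := List.length_dropWhile_le (· == c) rest; simp; omega
  · simp

def CheckSuccessivecharacters_py_alt (password : String) (PassSuccSameCharAllow : String) : Bool :=
  pvBLoop PassSuccSameCharAllow password.toList

-- ===== PRECONDITION & SPEC =====
-- Pre_ excludes exactly the inputs where Python A raises ValueError: a password containing two equal
-- adjacent characters together with a PassSuccSameCharAllow that int() cannot parse.
def Pre_CheckSuccessivecharacters_py (password : String) (PassSuccSameCharAllow : String) : Prop :=
  (PySem.Int.ofStr? PassSuccSameCharAllow).isSome = true ∨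
  (password.toList.zip password.toList.tail).all (fun p => p.1 ≠ p.2) = true
instance (password : String) (PassSuccSameCharAllow : String) : Decidable (Pre_CheckSuccessivecharacters_py password PassSuccSameCharAllow) := by unfold Pre_CheckSuccessivecharacters_py; infer_instance

def pvWitness_CheckSuccessivecharacters_py : String × String := ("aab", "2")

def Spec_CheckSuccessivecharacters_py (password : String) (PassSuccSameCharAllow : String) (out : Bool) : Prop := out = CheckSuccessivecharacters_py_alt password PassSuccSameCharAllow
instance (password : String) (PassSuccSameCharAllow : String) (out : Bool) : Decidable (Spec_CheckSuccessivecharacters_py password PassSuccSameCharAllow out) := by unfold Spec_CheckSuccessivecharacters_py; infer_instance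

-- ===== CLAIM (what is proved, stated in full; the proofs are below) =====
def Claim_equal_CheckSuccessivecharacters_py : Prop := ∀ (password : String) (PassSuccSameCharAllow : String), Dom_CheckSuccessivecharacters_py password PassSuccSameCharAllow → Pre_CheckSuccessivecharacters_py password PassSuccSameCharAllow → Spec_CheckSuccessivecharacters_py password PassSuccSameCharAllow (CheckSuccessivecharacters_py password PassSuccSameCharAllow)

-- ===== LEMMAS AND PROOFS =====

-- 'fresh start' of A's loop after the first character of a run has been consumed
def pvFresh (allow : String) : List Char → Bool
  | [] => false
  | c :: rest => pvALoop allow rest 1 (some c)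

lemma pvALoop_cons (allow : String) (c : Char) (rest : List Char) (n : Int) (last : Option Char) :
    pvALoop allow (c :: rest) n last =
      if some c == last then
        (if pvCheck allow (n + 1) then true else pvALoop allow rest (n + 1) last)
      else pvALoop allow rest 1 (some c) := rfl

lemma pvBLoop_cons (allow : String) (c : Char) (rest : List Char) :
    pvBLoop allow (c :: rest) =
      if (rest.takeWhile (· == c)).length + 1 ≥ 2 then
        (if pvCheck allow (((rest.takeWhile (· == c)).length : Int) + 1) then true
         else pvBLoop allow (rest.dropWhile (· == c)))
      else pvBLoop allow rest := by
  rw [pvBLoop]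

lemma pvCheck_mono (allow : String) (m m' : Int) (hle : m ≤ m')
    (h : pvCheck allow m = true) : pvCheck allow m' = true := by
  unfold pvCheck at h ⊢
  cases hk : PySem.Int.ofStr? allow with
  | none => rfl
  | some k =>
    rw [hk] at h
    simp at h ⊢
    omega

-- A's loop over the maximal run of c: fires iff the run is nonempty and the final count passes pvCheck
lemma pvALoop_run (allow : String) : ∀ (s : List Char) (n : Int) (c : Char),
    pvALoop allow s n (some c) =
      (if (s.takeWhile (· == c)) ≠ [] ∧ pvCheck allow (n + (s.takeWhile (· == c)).length) = true
       then true else pvFresh allow (s.dropWhile (· == c))) := by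
  intro s
  induction s with
  | nil => intro n c; simp [pvALoop, pvFresh]
  | cons d r ih =>
    intro n c
    rw [pvALoop_cons]
    by_cases hd : d = c
    · subst hd
      rw [List.takeWhile_cons, List.dropWhile_cons]
      simp only [BEq.refl, if_pos, List.length_cons, ne_eq, reduceCtorEq, not_false_iff, true_and]
      by_cases hc : pvCheck allow (n + 1) = true
      · rw [if_pos hc, if_pos]
        apply pvCheck_mono allow (n + 1) _ (by push_cast; omega) hc
      · rw [if_neg hc, ih (n + 1) d]
        have harg : n + 1 + ((List.takeWhile (fun x => x == d) r).length : Int)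
            = n + (((List.takeWhile (fun x => x == d) r).length + 1 : Nat) : Int) := by
          push_cast; ring
        rw [harg]
        by_cases htw0 : List.takeWhile (fun x => x == d) r = []
        · simp only [htw0, ne_eq, not_true_eq_false, false_and, if_false, List.length_nil]
          rw [if_neg (by simpa using hc)]
        · simp [htw0]
    · have hbe : (some d == some c) = false := by simp [hd]
      have hne : (d == c) = false := by simp [hd]
      rw [List.takeWhile_cons, List.dropWhile_cons, hne, hbe]
      simp [pvFresh]

lemma pvFresh_eq_pvBLoop (allow : String) :
    ∀ (n : Nat) (s : List Char), s.length ≤ n → pvFresh allow s = pvBLoop allow s := by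
  intro n
  induction n with
  | zero =>
    intro s h
    have : s = [] := by cases s <;> simp_all
    subst this; simp [pvFresh, pvBLoop]
  | succ n ih =>
    intro s h
    cases s with
    | nil => simp [pvFresh, pvBLoop]
    | cons c rest =>
      rw [show pvFresh allow (c :: rest) = pvALoop allow rest 1 (some c) from rfl]
      rw [pvALoop_run, pvBLoop_cons]
      by_cases htw : rest.takeWhile (· == c) = []
      · have hdw : rest.dropWhile (· == c) = rest := by
          rcases hh : rest with _ | ⟨d, r⟩
          · rfl
          · rw [hh] at htw
            rw [List.takeWhile_cons] at htw
            rw [List.dropWhile_cons]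
            split at htw
            · simp_all
            · simp_all
        rw [if_neg (by simp [htw]), hdw, if_neg (by simp [htw])]
        exact ih rest (by simp at h; omega)
      · have hlen : (rest.takeWhile (· == c)).length ≥ 1 := by
          cases hh : rest.takeWhile (· == c) <;> simp_all
        rw [if_pos (show 2 ≤ (rest.takeWhile (· == c)).length + 1 from by omega)]
        have harith : (1 : Int) + ((rest.takeWhile (· == c)).length : Int)
            = ((rest.takeWhile (· == c)).length : Int) + 1 := by ring
        by_cases hc : pvCheck allow (((rest.takeWhile (· == c)).length : Int) + 1) = true
        · rw [if_pos (show rest.takeWhile (· == c) ≠ [] ∧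
              pvCheck allow (1 + ((rest.takeWhile (· == c)).length : Int)) = true from
              ⟨htw, by rw [harith]; exact hc⟩), if_pos hc]
        · rw [if_neg (show ¬(rest.takeWhile (· == c) ≠ [] ∧
              pvCheck allow (1 + ((rest.takeWhile (· == c)).length : Int)) = true) from
              by rw [harith]; tauto), if_neg hc]
          apply ih
          have h1 := List.length_dropWhile_le (· == c) rest
          simp at h; omega

lemma pvStart (allow : String) (s : List Char) :
    pvALoop allow s 1 none = pvFresh allow s := by
  cases s with
  | nil => rfl
  | cons c rest =>
    rw [pvALoop_cons, if_neg (by simp)]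
    rfl

-- ===== VERDICT (by name: the statement is the Claim_ definition above) =====
theorem CheckSuccessivecharacters_py_spec : Claim_equal_CheckSuccessivecharacters_py := by
  intro password allow _ _
  unfold Spec_CheckSuccessivecharacters_py CheckSuccessivecharacters_py CheckSuccessivecharacters_py_alt
  rw [pvStart]
  exact pvFresh_eq_pvBLoop allow password.toList.length password.toList le_rfl
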